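-- pv_equiv track=rewrite | github.com/MNico99/Sintaxis-TP01 | automatas.py | A_String
-- ===== SOURCE A (Python) =====
-- TRAMPA = -1
--
-- RESULTADO_ACEPTADO = "ACEPTADO"
--
-- RESULTADO_TRAMPA = "TRAMPA"
--
-- RESULTADO_NO_ACEPTADO = "NO_ACEPTADO"
--
-- def d_String(estado_anterior, caracter):
--     if estado_anterior == 0 and caracter == "'":
--         return 1
--     if estado_anterior == 1 and caracter.isalpha():
--         return 2
--     if estado_anterior == 1 and caracter.isdigit():
--         return 2
--     if estado_anterior == 2 and caracter.isalpha():
--         return 2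
--     if estado_anterior == 2 and caracter.isdigit():
--         return 2
--     if estado_anterior == 2 and caracter == "'":
--         return 3
--
--
--     return TRAMPA
--
-- def A_String(cadena):
--     Finales = [3]
--     estado_actual = 0
--
--     for caracter in cadena:
--         estado_proximo = d_String(estado_actual, caracter)
--         if estado_proximo == TRAMPA:
--             return RESULTADO_TRAMPA
--         estado_actual = estado_proximo
--
--     if estado_actual in Finales:
--         return RESULTADO_ACEPTADO
--     else:
--         return RESULTADO_NO_ACEPTADO
-- ===== SOURCE B (Python) =====
-- RESULTADO_ACEPTADO = "ACEPTADO"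
-- RESULTADO_TRAMPA = "TRAMPA"
-- RESULTADO_NO_ACEPTADO = "NO_ACEPTADO"
--
-- def A_String(cadena):
--     # Positional parse: opening quote, then alnum body, closing quote must be last.
--     if cadena == "":
--         return RESULTADO_NO_ACEPTADO
--     if cadena[0] != "'":
--         return RESULTADO_TRAMPA
--     body = cadena[1:]
--     first = True
--     for i, c in enumerate(body):
--         if c == "'":
--             if i == len(body) - 1 and not first:
--                 return RESULTADO_ACEPTADO
--             return RESULTADO_TRAMPA
--         if not (c.isalpha() or c.isdigit()):
--             return RESULTADO_TRAMPA
--         first = False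
--     return RESULTADO_NO_ACEPTADO
-- ===== Notes on version B (the rewrite author's own statement) =====
-- stated objective: simpler
-- what changed: Replaced the numeric-state DFA (transition function d_String driven by a state variable) with a direct positional parse: check the opening quote, scan the alphanumeric body, and accept only a closing quote in final position.
import Mathlib
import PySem

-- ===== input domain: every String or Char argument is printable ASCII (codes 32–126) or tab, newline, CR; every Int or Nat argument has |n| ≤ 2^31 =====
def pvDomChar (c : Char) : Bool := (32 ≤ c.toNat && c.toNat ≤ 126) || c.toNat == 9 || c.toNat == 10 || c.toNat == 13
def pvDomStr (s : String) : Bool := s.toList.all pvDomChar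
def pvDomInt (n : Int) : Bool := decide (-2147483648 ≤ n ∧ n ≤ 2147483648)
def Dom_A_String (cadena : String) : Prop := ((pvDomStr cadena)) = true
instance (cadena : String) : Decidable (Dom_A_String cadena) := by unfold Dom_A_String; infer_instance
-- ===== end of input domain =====

-- B replaces the numeric-state DFA with a direct positional parse (opening quote, alnum body, final closing quote); objective: simpler.

-- ===== PORT A =====
def dString (estado_anterior : Int) (caracter : Char) : Int :=
  if estado_anterior = 0 ∧ caracter = '\'' then 1
  else if estado_anterior = 1 ∧ PySem.Chars.isalpha caracter then 2
  else if estado_anterior = 1 ∧ PySem.Chars.isdigit caracter then 2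
  else if estado_anterior = 2 ∧ PySem.Chars.isalpha caracter then 2
  else if estado_anterior = 2 ∧ PySem.Chars.isdigit caracter then 2
  else if estado_anterior = 2 ∧ caracter = '\'' then 3
  else -1

def aStringLoop (estado_actual : Int) : List Char → String
  | [] => if estado_actual = 3 then "ACEPTADO" else "NO_ACEPTADO"
  | c :: rest =>
    let estado_proximo := dString estado_actual c
    if estado_proximo = -1 then "TRAMPA" else aStringLoop estado_proximo rest

def A_String (cadena : String) : String := aStringLoop 0 cadena.toList

-- ===== PORT B =====
-- scan of the body after the opening quote; `first` tracks i = 0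
def bScan (first : Bool) : List Char → String
  | [] => "NO_ACEPTADO"
  | c :: rest =>
    if c = '\'' then
      if rest = [] ∧ first = false then "ACEPTADO" else "TRAMPA"
    else if PySem.Chars.isalpha c || PySem.Chars.isdigit c then bScan false rest
    else "TRAMPA"

def A_String_alt (cadena : String) : String :=
  match cadena.toList with
  | [] => "NO_ACEPTADO"
  | c :: body => if c ≠ '\'' then "TRAMPA" else bScan true body

-- ===== PRECONDITION & SPEC =====
def Spec_A_String (cadena : String) (out : String) : Prop := out = A_String_alt cadena
instance (cadena : String) (out : String) : Decidable (Spec_A_String cadena out) := by unfold Spec_A_String; infer_instance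

-- ===== CLAIM (what is proved, stated in full; the proofs are below) =====
def Claim_equal_A_String : Prop := ∀ (cadena : String), Dom_A_String cadena → Spec_A_String cadena (A_String cadena)

-- ===== LEMMAS AND PROOFS =====
theorem aLoop3' (l : List Char) : aStringLoop 3 l = (if l = [] then "ACEPTADO" else "TRAMPA") := by
  cases l with
  | nil => simp [aStringLoop]
  | cons c rest => simp [aStringLoop, dString]

theorem aLoop2 (l : List Char) : aStringLoop 2 l = bScan false l := by
  induction l with
  | nil => simp [aStringLoop, bScan]
  | cons c rest ih =>
    by_cases hq : c = '\''
    · subst hq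
      have ha : PySem.Chars.isalpha '\'' = false := by decide
      have hd : PySem.Chars.isdigit '\'' = false := by decide
      simp [aStringLoop, bScan, dString, ha, hd, aLoop3']
    · by_cases ha : PySem.Chars.isalpha c
      · simp [aStringLoop, bScan, dString, hq, ha, ih]
      · by_cases hd : PySem.Chars.isdigit c
        · simp [aStringLoop, bScan, dString, hq, ha, hd, ih]
        · simp [aStringLoop, bScan, dString, hq, ha, hd]

theorem aLoop1 (l : List Char) : aStringLoop 1 l = bScan true l := by
  cases l with
  | nil => simp [aStringLoop, bScan]
  | cons c rest =>
    by_cases hq : c = '\''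
    · subst hq
      have ha : PySem.Chars.isalpha '\'' = false := by decide
      have hd : PySem.Chars.isdigit '\'' = false := by decide
      simp [aStringLoop, bScan, dString, ha, hd]
    · by_cases ha : PySem.Chars.isalpha c
      · simp [aStringLoop, bScan, dString, hq, ha, aLoop2]
      · by_cases hd : PySem.Chars.isdigit c
        · simp [aStringLoop, bScan, dString, hq, ha, hd, aLoop2]
        · simp [aStringLoop, bScan, dString, hq, ha, hd]

-- ===== VERDICT (by name: the statement is the Claim_ definition above) =====
theorem A_String_spec : Claim_equal_A_String := by
  intro cadena _
  unfold Spec_A_String A_String A_String_alt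
  cases h : cadena.toList with
  | nil => simp [aStringLoop]
  | cons c body =>
    by_cases hq : c = '\''
    · subst hq
      simp [aStringLoop, dString, aLoop1]
    · simp [aStringLoop, dString, hq]
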